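-- pv_equiv track=rewrite | github.com/dremocanu-lab/bloodwork-os-mvp | backend/app/services/lab_catalog.py | get_detected_categories
-- ===== SOURCE A (Python) =====
-- from typing import Any
--
-- CATEGORY_ORDER = [
--     "Hematologie",
--     "Coagulare",
--     "Biochimie generala",
--     "Endocrinologie",
--     "Imunologie",
--     "Markeri tumorali",
--     "Biologie moleculara generala",
--     "Microbiologie",
--     "Alte analize",
-- ]
--
-- def get_detected_categories(rows: list[dict[str, Any]]) -> list[str]:
--     categories: list[str] = []
--
--     for row in rows or []:
--         category = row.get("category") or "Alte analize"
--
--         if category not in categories: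
--             categories.append(category)
--
--     return sorted(
--         categories,
--         key=lambda category: CATEGORY_ORDER.index(category) if category in CATEGORY_ORDER else 999,
--     )
-- ===== SOURCE B (Python) =====
-- CATEGORY_ORDER = [
--     "Hematologie",
--     "Coagulare",
--     "Biochimie generala",
--     "Endocrinologie",
--     "Imunologie",
--     "Markeri tumorali",
--     "Biologie moleculara generala",
--     "Microbiologie",
--     "Alte analize",
-- ]
--
--
-- def get_detected_categories(rows):
--     detected = list(dict.fromkeys(
--         (row.get("category") or "Alte analize") for row in (rows or [])
--     ))
--     known = set(CATEGORY_ORDER)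
--     return [c for c in CATEGORY_ORDER if c in detected] + \
--            [c for c in detected if c not in known]
-- ===== Notes on version B (the rewrite author's own statement) =====
-- stated objective: idiomatic
-- what changed: Instead of collecting categories and sorting them with an index-or-999 key, B dedups the detected categories once, then emits CATEGORY_ORDER filtered to the detected set followed by the unknown categories in first-encounter order, replacing the sort with two linear filters.
import Mathlib
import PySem

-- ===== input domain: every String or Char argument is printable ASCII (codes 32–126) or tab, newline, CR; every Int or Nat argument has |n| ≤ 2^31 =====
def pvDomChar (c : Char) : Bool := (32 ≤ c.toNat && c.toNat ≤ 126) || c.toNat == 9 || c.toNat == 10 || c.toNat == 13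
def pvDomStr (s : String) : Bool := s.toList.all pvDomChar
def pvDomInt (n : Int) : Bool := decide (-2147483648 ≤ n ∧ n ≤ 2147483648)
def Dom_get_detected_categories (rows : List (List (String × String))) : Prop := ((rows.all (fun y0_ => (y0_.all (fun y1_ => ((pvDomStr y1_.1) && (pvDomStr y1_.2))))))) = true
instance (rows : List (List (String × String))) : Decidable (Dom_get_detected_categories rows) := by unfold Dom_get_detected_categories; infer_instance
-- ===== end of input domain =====

-- B replaces A's 'collect then sort by index-or-999 key' with 'dedup once, then emit
-- CATEGORY_ORDER filtered to the detected set followed by the unknown categories in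
-- first-encounter order' (idiomatic two-filter construction; same result).

-- shared module constant CATEGORY_ORDER
def pvCategoryOrder : List String :=
  ["Hematologie", "Coagulare", "Biochimie generala", "Endocrinologie", "Imunologie",
   "Markeri tumorali", "Biologie moleculara generala", "Microbiologie", "Alte analize"]

-- row.get("category") or "Alte analize"  (a missing key and the falsy "" both give the default)
def pvCatOf (row : List (String × String)) : String :=
  match PySem.Dict.get? (PySem.Dict.mk row) "category" with
  | none => "Alte analize"
  | some c => if c = "" then "Alte analize" else c

-- ===== PORT A =====
-- key=lambda category: CATEGORY_ORDER.index(category) if category in CATEGORY_ORDER else 999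
def pvKeyA (c : String) : Int :=
  if c ∈ pvCategoryOrder then (((PySem.List.index? pvCategoryOrder c).getD 0 : Nat) : Int) else 999

def get_detected_categories (rows : List (List (String × String))) : List String :=
  let categories := rows.foldl (fun acc row =>
    let category := pvCatOf row
    if category ∈ acc then acc else acc ++ [category]) []
  PySem.List.sorted categories pvKeyA false

-- ===== PORT B =====
def get_detected_categories_alt (rows : List (List (String × String))) : List String :=
  let detected := PySem.List.dedup (rows.map pvCatOf)
  pvCategoryOrder.filter (fun c => decide (c ∈ detected))
    ++ detected.filter (fun c => decide (c ∉ pvCategoryOrder))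

-- ===== PRECONDITION & SPEC =====
def Spec_get_detected_categories (rows : List (List (String × String))) (out : List String) : Prop := out = get_detected_categories_alt rows
instance (rows : List (List (String × String))) (out : List String) : Decidable (Spec_get_detected_categories rows out) := by unfold Spec_get_detected_categories; infer_instance

-- ===== CLAIM (what is proved, stated in full; the proofs are below) =====
def Claim_equal_get_detected_categories : Prop := ∀ (rows : List (List (String × String))), Dom_get_detected_categories rows → Spec_get_detected_categories rows (get_detected_categories rows)

-- ===== LEMMAS AND PROOFS =====

-- the generic index-or-999 key relative to an order list L
def pvKf (L : List String) (c : String) : Int :=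
  if c ∈ L then (List.idxOf c L : Int) else 999

lemma pvIdxOf?_of_mem (L : List String) (c : String) (hL : L.Nodup) (h : c ∈ L) :
    List.idxOf? c L = some (L.idxOf c) := by
  rw [List.idxOf?_eq_some_iff]
  refine ⟨List.idxOf_lt_length_of_mem h, List.getElem_idxOf _, ?_⟩
  intro j hj hEq
  have hjlt : j < L.length := lt_trans hj (List.idxOf_lt_length_of_mem h)
  have := hL.idxOf_getElem j hjlt
  rw [hEq] at this
  omega

lemma pvKeyA_eq (c : String) : pvKeyA c = pvKf pvCategoryOrder c := by
  unfold pvKeyA pvKf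
  split_ifs with h
  · rw [PySem.List.index?_eq_idxOf?, pvIdxOf?_of_mem _ _ (by decide) h]
    rfl
  · rfl

-- A's dedup loop builds exactly PySem.List.dedup of the mapped categories
lemma pvLoop_eq_dedup (rows : List (List (String × String))) :
    rows.foldl (fun acc row =>
      let category := pvCatOf row
      if category ∈ acc then acc else acc ++ [category]) []
    = PySem.List.dedup (rows.map pvCatOf) := by
  unfold PySem.List.dedup PySem.Set.ofList
  rw [List.foldl_map]
  congr 1
  funext acc c
  simp [PySem.Set.add]

-- insertBy passes over a prefix it does not insert into
lemma pvInsertBy_append_not_before (bf : String → String → Bool) (x : String)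
    (ys zs : List String) (h : ∀ y ∈ ys, bf x y = false) :
    PySem.List.insertBy bf x (ys ++ zs) = ys ++ PySem.List.insertBy bf x zs := by
  induction ys with
  | nil => rfl
  | cons y ys ih =>
      have hy : bf x y = false := h y List.mem_cons_self
      simp only [List.cons_append, PySem.List.insertBy, hy]
      simp only [Bool.false_eq_true, if_false, List.cons.injEq, true_and]
      exact ih (fun y hy => h y (List.mem_cons_of_mem _ hy))

-- insertBy puts x in front when it goes before everything
lemma pvInsertBy_front (bf : String → String → Bool) (x : String)
    (zs : List String) (h : ∀ z ∈ zs, bf x z = true) :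
    PySem.List.insertBy bf x zs = x :: zs := by
  cases zs with
  | nil => rfl
  | cons z zs => simp [PySem.List.insertBy, h z List.mem_cons_self]

-- main combinatorial fact: the stable sort by index-or-999 key of a duplicate-free
-- list d is "L filtered to d" followed by "d's elements outside L" in d's order
lemma pvSorted_eq (L : List String) (hL : L.Nodup) (hlen : L.length ≤ 999)
    (d : List String) (hd : d.Nodup) :
    PySem.List.sorted d (pvKf L) false =
      L.filter (fun c => decide (c ∈ d)) ++ d.filter (fun c => decide (c ∉ L)) := by
  induction d using List.reverseRecOn with
  | nil => simp [PySem.List.sorted]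
  | append_singleton d x ih =>
      have hxd : x ∉ d := by simp [List.nodup_append] at hd; tauto
      have hdn : d.Nodup := hd.sublist (List.sublist_append_left _ _)
      have hkey_le : ∀ y, pvKf L y ≤ 999 := by
        intro y
        unfold pvKf
        split_ifs with h
        · have := List.idxOf_lt_length_of_mem h
          omega
        · omega
      rw [PySem.List.sorted_eq_foldl_insertBy, List.foldl_append,
          ← PySem.List.sorted_eq_foldl_insertBy, ih hdn]
      simp only [List.foldl_cons, List.foldl_nil]
      by_cases hxL : x ∈ L
      · -- x is a known category: it is inserted at its CATEGORY_ORDER position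
        have hi : L.idxOf x < L.length := List.idxOf_lt_length_of_mem hxL
        set i := L.idxOf x with hi_def
        have hsplit : L = L.take i ++ x :: L.drop (i + 1) := by
          conv_lhs => rw [← List.take_append_drop i L]
          rw [List.drop_eq_getElem_cons hi, List.getElem_idxOf hi]
        have hxtake : x ∉ L.take i := by
          intro hmem
          rw [List.mem_take_iff_getElem] at hmem
          obtain ⟨j, hj, hEq⟩ := hmem
          have hjlt : j < L.length := by omega
          have := hL.idxOf_getElem j hjlt
          rw [hEq] at this
          omega
        have hxdrop : x ∉ L.drop (i + 1) := by
          intro hmem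
          obtain ⟨j, hj, hEq⟩ := List.mem_iff_getElem.mp hmem
          have hjlt : i + 1 + j < L.length := by
            simp only [List.length_drop] at hj
            omega
          rw [List.getElem_drop] at hEq
          have := hL.idxOf_getElem (i + 1 + j) hjlt
          rw [hEq] at this
          omega
        have hktake : ∀ a ∈ L.take i, pvKf L a < (i : Int) := by
          intro a hmem
          have haL : a ∈ L := List.mem_of_mem_take hmem
          rw [List.mem_take_iff_getElem] at hmem
          obtain ⟨j, hj, hEq⟩ := hmem
          have hjlt : j < L.length := by omega
          have hidx : L.idxOf a = j := by rw [← hEq]; exact hL.idxOf_getElem j hjlt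
          unfold pvKf
          rw [if_pos haL, hidx]
          have : j < i := by omega
          exact_mod_cast this
        have hkdrop : ∀ b ∈ L.drop (i + 1), (i : Int) < pvKf L b := by
          intro b hmem
          have hbL : b ∈ L := List.mem_of_mem_drop hmem
          obtain ⟨j, hj, hEq⟩ := List.mem_iff_getElem.mp hmem
          have hjlt : i + 1 + j < L.length := by
            simp only [List.length_drop] at hj
            omega
          rw [List.getElem_drop] at hEq
          have hidx : L.idxOf b = i + 1 + j := by
            rw [← hEq]; exact hL.idxOf_getElem (i + 1 + j) hjlt
          unfold pvKf
          rw [if_pos hbL, hidx]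
          have : i < i + 1 + j := by omega
          exact_mod_cast this
        have hkx : pvKf L x = (i : Int) := by unfold pvKf; rw [if_pos hxL]
        have hKd : L.filter (fun c => decide (c ∈ d)) =
            (L.take i).filter (fun c => decide (c ∈ d))
              ++ (L.drop (i + 1)).filter (fun c => decide (c ∈ d)) := by
          conv_lhs => rw [hsplit]
          rw [List.filter_append, List.filter_cons]
          simp [hxd]
        have hKd' : L.filter (fun c => decide (c ∈ d ++ [x])) =
            (L.take i).filter (fun c => decide (c ∈ d))
              ++ x :: (L.drop (i + 1)).filter (fun c => decide (c ∈ d)) := by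
          conv_lhs => rw [hsplit]
          rw [List.filter_append, List.filter_cons]
          have h1 : (L.take i).filter (fun c => decide (c ∈ d ++ [x])) =
              (L.take i).filter (fun c => decide (c ∈ d)) := by
            apply List.filter_congr
            intro c hc
            have : c ≠ x := fun h => hxtake (h ▸ hc)
            simp [this]
          have h2 : (L.drop (i + 1)).filter (fun c => decide (c ∈ d ++ [x])) =
              (L.drop (i + 1)).filter (fun c => decide (c ∈ d)) := by
            apply List.filter_congr
            intro c hc
            have : c ≠ x := fun h => hxdrop (h ▸ hc)
            simp [this]
          rw [h1, h2]
          simp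
        have hUd : (d ++ [x]).filter (fun c => decide (c ∉ L)) =
            d.filter (fun c => decide (c ∉ L)) := by
          rw [List.filter_append]
          simp [hxL]
        rw [hKd, hKd', hUd, List.append_assoc]
        rw [pvInsertBy_append_not_before _ x _ _ (by
          intro y hy
          have := hktake y (List.mem_of_mem_filter hy)
          simp only [decide_eq_false_iff_not, hkx]
          omega)]
        rw [pvInsertBy_front _ x _ (by
          intro z hz
          rcases List.mem_append.mp hz with hz | hz
          · have := hkdrop z (List.mem_of_mem_filter hz)
            simp only [decide_eq_true_eq, hkx]
            omega
          · have hzL : z ∉ L := by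
              have := List.of_mem_filter hz
              simpa using this
            have h999 : pvKf L z = 999 := by unfold pvKf; rw [if_neg hzL]
            simp only [decide_eq_true_eq, hkx, h999]
            omega)]
        simp
      · -- x is unknown: it is appended after everything
        rw [PySem.List.insertBy_of_forall_not_before _ _ _ (by
          intro y _
          have h999 : pvKf L x = 999 := by unfold pvKf; rw [if_neg hxL]
          have := hkey_le y
          simp only [decide_eq_false_iff_not, h999]
          omega)]
        have hKeq : L.filter (fun c => decide (c ∈ d ++ [x])) =
            L.filter (fun c => decide (c ∈ d)) := by
          apply List.filter_congr
          intro c hc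
          have : c ≠ x := fun h => hxL (h ▸ hc)
          simp [this]
        rw [hKeq, List.filter_append]
        simp [hxL]

-- ===== VERDICT (by name: the statement is the Claim_ definition above) =====
theorem get_detected_categories_spec : Claim_equal_get_detected_categories := by
  intro rows _
  unfold Spec_get_detected_categories get_detected_categories get_detected_categories_alt
  rw [pvLoop_eq_dedup]
  have hkey : pvKeyA = pvKf pvCategoryOrder := funext pvKeyA_eq
  rw [hkey]
  exact pvSorted_eq pvCategoryOrder (by decide) (by decide)
    (PySem.List.dedup (rows.map pvCatOf)) (by
      rw [PySem.List.dedup_eq_ofList]; exact PySem.Set.nodup_ofList _)
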